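-- pv_equiv track=rewrite | github.com/VijaySaiBorru/TripCraft | evaluation/commonsense_constraint_no_quote.py | is_valid_transportation
-- ===== SOURCE A (Python) =====
-- def transportation_match(text: str):
--     """
--     Classifies transportation type from a text description.
--     Returns one of: 'Flight', 'Self-driving', 'Taxi', or None.
--     """
--     if not text or not isinstance(text, str):
--         return None
--
--     t = text.lower()
--
--     # Flight must be checked first (highest priority)
--     if 'flight' in t:
--         return 'Flight'
--
--     # Ground transport
--     if 'self-driving' in t or 'self driving' in t:
--         return 'Self-driving'
--
--     if 'taxi' in t:
--         return 'Taxi'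
--
--     return None
--
-- def is_valid_transportation(question, tested_data):
--     """
--     Ensures:
--     1. Transportation exists on odd-numbered (travel) days
--     2. Transportation modes used across the trip are not conflicting
--     """
--
--     transportation_modes = set()
--
--     for idx, unit in enumerate(tested_data[:question['days']]):
--         day_number = idx + 1
--         value = unit.get('transportation')
--
--         # Odd days are travel days → transportation required
--         if day_number % 2 == 1:
--             if not value or value == '-':
--                 return False, f"No transportation provided on travel day {day_number}."
--
--         if value and value != '-':
--             mode = transportation_match(value)
--             if mode:
--                 transportation_modes.add(mode)
--
--     # Conflicting combinations
--     if 'Self-driving' in transportation_modes and 'Flight' in transportation_modes: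
--         return False, "The transportation is conflicting (Self-driving + Flight)."
--
--     if 'Self-driving' in transportation_modes and 'Taxi' in transportation_modes:
--         return False, "The transportation is conflicting (Self-driving + Taxi)."
--
--     return True, None
-- ===== SOURCE B (Python) =====
-- def transportation_match(text: str):
--     if not text or not isinstance(text, str):
--         return None
--     t = text.lower()
--     if 'flight' in t:
--         return 'Flight'
--     if 'self-driving' in t or 'self driving' in t:
--         return 'Self-driving'
--     if 'taxi' in t:
--         return 'Taxi'
--     return None
--
--
-- def is_valid_transportation(question, tested_data):
--     """Two-pass check: first the odd-day presence scan, then the mode-set conflict scan."""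
--     trip = tested_data[:question['days']]
--
--     # Pass 1: every odd (travel) day must name a transportation.
--     for idx, unit in enumerate(trip):
--         day_number = idx + 1
--         if day_number % 2 == 1:
--             value = unit.get('transportation')
--             if not value or value == '-':
--                 return False, f"No transportation provided on travel day {day_number}."
--
--     # Pass 2: collect the modes used anywhere in the trip.
--     modes = {m for unit in trip
--              for v in [unit.get('transportation')]
--              if v and v != '-'
--              for m in [transportation_match(v)]
--              if m}
--
--     if 'Self-driving' in modes and 'Flight' in modes:
--         return False, "The transportation is conflicting (Self-driving + Flight)."
--     if 'Self-driving' in modes and 'Taxi' in modes: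
--         return False, "The transportation is conflicting (Self-driving + Taxi)."
--     return True, None
-- ===== Notes on version B (the rewrite author's own statement) =====
-- stated objective: simpler
-- what changed: B splits A's single combined loop into two independent passes: a first scan that reports the first odd day without transportation, and a second pass building the mode set as a set comprehension before the two conflict checks.
import Mathlib
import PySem

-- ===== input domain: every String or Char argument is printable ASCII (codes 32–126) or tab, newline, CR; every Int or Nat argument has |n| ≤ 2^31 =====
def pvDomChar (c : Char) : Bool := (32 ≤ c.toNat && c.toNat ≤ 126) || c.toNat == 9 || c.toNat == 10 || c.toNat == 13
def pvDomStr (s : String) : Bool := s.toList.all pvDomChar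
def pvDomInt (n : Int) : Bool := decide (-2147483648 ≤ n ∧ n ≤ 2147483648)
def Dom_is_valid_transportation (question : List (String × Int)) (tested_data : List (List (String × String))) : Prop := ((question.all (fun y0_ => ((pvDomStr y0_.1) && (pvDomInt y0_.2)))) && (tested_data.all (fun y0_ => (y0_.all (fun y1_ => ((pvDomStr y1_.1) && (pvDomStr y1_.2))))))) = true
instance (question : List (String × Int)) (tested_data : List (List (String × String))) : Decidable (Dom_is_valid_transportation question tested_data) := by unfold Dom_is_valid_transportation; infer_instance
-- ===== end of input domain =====

-- B replaces A's single combined loop by two separate passes (odd-day presence scan, then a set-comprehension mode collection) with the same conflict checks; objective: simpler decomposition, same cost.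



-- ===== PORT A =====
-- shared module helper (same module in the Python source; used by both implementations)
def transportation_match (text : String) : Option String :=
  if text = "" then none
  else
    let t := PySem.Str.lower text
    if PySem.Str.isIn "flight" t then some "Flight"
    else if PySem.Str.isIn "self-driving" t || PySem.Str.isIn "self driving" t then
      some "Self-driving"
    else if PySem.Str.isIn "taxi" t then some "Taxi"
    else none

-- A's trailing conflict check (the code after A's loop)
def pvAConflict (modes : PySem.Set String) : Bool × Option String :=
  if PySem.Set.contains modes "Self-driving" && PySem.Set.contains modes "Flight" then
    (false, some "The transportation is conflicting (Self-driving + Flight).")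
  else if PySem.Set.contains modes "Self-driving" && PySem.Set.contains modes "Taxi" then
    (false, some "The transportation is conflicting (Self-driving + Taxi).")
  else (true, none)

-- A's single loop: carries the accumulated mode set, early-returns on a bad odd day
def pvALoop : List (List (String × String)) → Nat → PySem.Set String → Bool × Option String
  | [], _, modes => pvAConflict modes
  | unit :: rest, idx, modes =>
    let day : Int := (idx : Int) + 1
    let value := (PySem.Dict.mk unit).get? "transportation"
    if PySem.Int.mod day 2 == 1 && (value == none || value == some "" || value == some "-") then
      (false, some ("No transportation provided on travel day " ++ PySem.Int.toStr day ++ "."))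
    else
      let modes' :=
        match value with
        | some v =>
          if v != "" && v != "-" then
            match transportation_match v with
            | some m => PySem.Set.add modes m
            | none => modes
          else modes
        | none => modes
      pvALoop rest (idx + 1) modes'

def is_valid_transportation (question : List (String × Int)) (tested_data : List (List (String × String))) : Bool × Option String :=
  match (PySem.Dict.mk question).get? "days" with
  | none => (false, none)  -- Python raises KeyError here; excluded by Pre_
  | some d => pvALoop (PySem.List.slice tested_data none (some d)) 0 PySem.Set.empty

-- ===== PORT B =====
-- B's first pass: first odd day with missing transportation, if any
def pvBFirstMissing : List (List (String × String)) → Nat → Option (Bool × Option String)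
  | [], _ => none
  | unit :: rest, idx =>
    let day : Int := (idx : Int) + 1
    if PySem.Int.mod day 2 == 1 then
      let value := (PySem.Dict.mk unit).get? "transportation"
      if value == none || value == some "" || value == some "-" then
        some (false, some ("No transportation provided on travel day " ++ PySem.Int.toStr day ++ "."))
      else pvBFirstMissing rest (idx + 1)
    else pvBFirstMissing rest (idx + 1)

-- one step of B's set comprehension
def pvBStep (modes : PySem.Set String) (unit : List (String × String)) : PySem.Set String :=
  match (PySem.Dict.mk unit).get? "transportation" with
  | some v =>
    if v != "" && v != "-" then
      match transportation_match v with
      | some m => PySem.Set.add modes m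
      | none => modes
    else modes
  | none => modes

-- B's second pass: the mode set
def pvBModes (l : List (List (String × String))) : PySem.Set String :=
  l.foldl pvBStep PySem.Set.empty

-- B's conflict check (duplicated code in the Python, duplicated here)
def pvBConflict (modes : PySem.Set String) : Bool × Option String :=
  if PySem.Set.contains modes "Self-driving" && PySem.Set.contains modes "Flight" then
    (false, some "The transportation is conflicting (Self-driving + Flight).")
  else if PySem.Set.contains modes "Self-driving" && PySem.Set.contains modes "Taxi" then
    (false, some "The transportation is conflicting (Self-driving + Taxi).")
  else (true, none)

def is_valid_transportation_alt (question : List (String × Int)) (tested_data : List (List (String × String))) : Bool × Option String :=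
  match (PySem.Dict.mk question).get? "days" with
  | none => (false, none)  -- Python raises KeyError here; excluded by Pre_
  | some d =>
    let trip := PySem.List.slice tested_data none (some d)
    match pvBFirstMissing trip 0 with
    | some r => r
    | none => pvBConflict (pvBModes trip)

-- ===== PRECONDITION & SPEC =====
-- Pre_ excludes exactly the inputs on which A raises KeyError: question['days'] must exist.
def Pre_is_valid_transportation (question : List (String × Int)) (tested_data : List (List (String × String))) : Prop :=
  ((PySem.Dict.mk question).get? "days").isSome = true
instance (question : List (String × Int)) (tested_data : List (List (String × String))) : Decidable (Pre_is_valid_transportation question tested_data) := by unfold Pre_is_valid_transportation; infer_instance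

def pvWitness_is_valid_transportation : (List (String × Int)) × (List (List (String × String))) :=
  ([("days", 3)], [[("transportation", "Taxi from A to B")], [("x", "y")], [("transportation", "taxi back")]])

def Spec_is_valid_transportation (question : List (String × Int)) (tested_data : List (List (String × String))) (out : Bool × Option String) : Prop := out = is_valid_transportation_alt question tested_data
instance (question : List (String × Int)) (tested_data : List (List (String × String))) (out : Bool × Option String) : Decidable (Spec_is_valid_transportation question tested_data out) := by unfold Spec_is_valid_transportation; infer_instance

-- ===== CLAIM (what is proved, stated in full; the proofs are below) =====
def Claim_equal_is_valid_transportation : Prop := ∀ (question : List (String × Int)) (tested_data : List (List (String × String))), Dom_is_valid_transportation question tested_data → Pre_is_valid_transportation question tested_data → Spec_is_valid_transportation question tested_data (is_valid_transportation question tested_data)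

-- ===== LEMMAS AND PROOFS =====
theorem pvLoop_eq (l : List (List (String × String))) : ∀ (idx : Nat) (modes : PySem.Set String),
    pvALoop l idx modes =
      (match pvBFirstMissing l idx with
       | some r => r
       | none => pvBConflict (l.foldl pvBStep modes)) := by
  induction l with
  | nil => intro idx modes; rfl
  | cons unit rest ih =>
    intro idx modes
    simp only [pvALoop, pvBFirstMissing, List.foldl_cons]
    split_ifs with h1 h2 h3 <;>
      first
        | rfl
        | (rw [ih]; rfl)
        | simp_all

-- ===== VERDICT (by name: the statement is the Claim_ definition above) =====
theorem is_valid_transportation_spec : Claim_equal_is_valid_transportation := by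
  intro question tested_data _ _
  unfold Spec_is_valid_transportation is_valid_transportation is_valid_transportation_alt
  cases h : (PySem.Dict.mk question).get? "days" with
  | none => rfl
  | some d =>
    simp only [pvLoop_eq]
    rfl
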